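-- pv_equiv track=rewrite | github.com/ztxjm123/DSISP | LDAdata.py | hebin
-- ===== SOURCE A (Python) =====
-- def hebin(da):
--     x = []
--     x.append(da[0])
--     n = 0
--     for i in range(1, len(da)):
--         if da[i][1] == x[n][1]:
--             x[n][3] = da[i][3]+x[n][3]
--         else:
--             x.append(da[i])
--             n = n+1
--     return x
-- ===== SOURCE B (Python) =====
-- def hebin(da):
--     n = len(da)
--     cuts = [0] + [i for i in range(1, n) if da[i][1] != da[i - 1][1]] + [n]
--     x = []
--     for s, e in zip(cuts, cuts[1:]):
--         first = da[s]
--         if e - s > 1: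
--             first[3] = sum(r[3] for r in da[s + 1:e]) + first[3]
--         x.append(first)
--     return x
-- ===== Notes on version B (the rewrite author's own statement) =====
-- stated objective: alternative
-- what changed: B replaces A's single pass with a growing output list and cursor n by two staged passes: it first computes the list of cut indices where the key changes, then builds each output row from a slice between consecutive cuts, summing the slice's field-3 values with sum().
import Mathlib
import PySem

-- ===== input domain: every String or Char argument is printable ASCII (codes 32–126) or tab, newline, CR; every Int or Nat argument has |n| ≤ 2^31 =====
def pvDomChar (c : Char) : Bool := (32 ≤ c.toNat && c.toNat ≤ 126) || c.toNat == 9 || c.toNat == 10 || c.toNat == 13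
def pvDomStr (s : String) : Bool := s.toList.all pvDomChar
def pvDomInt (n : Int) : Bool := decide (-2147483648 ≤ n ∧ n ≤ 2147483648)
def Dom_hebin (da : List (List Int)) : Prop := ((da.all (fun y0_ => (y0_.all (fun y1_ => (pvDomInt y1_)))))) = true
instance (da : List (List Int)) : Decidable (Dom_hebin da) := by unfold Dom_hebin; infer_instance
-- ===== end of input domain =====

-- B replaces A's single pass (growing output list x with cursor n, in-place x[n][3] updates) by two
-- staged passes: first the list of cut indices where row[1] changes, then one output row per cut pair,
-- built from the slice between the cuts with sum(); same cost, alternative decomposition. Both A and B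
-- mutate the input's row objects in place; the equivalence proved is about the returned value.

-- ===== PORT A =====
-- loop body of A: r is da[i], s is (x, n)
def hebinStep (s : List (List Int) × Int) (r : List Int) : List (List Int) × Int :=
  if PySem.List.pyGetD r 1 0 = PySem.List.pyGetD (PySem.List.pyGetD s.1 s.2 []) 1 0 then
    (PySem.List.pySetD s.1 s.2
       (PySem.List.pySetD (PySem.List.pyGetD s.1 s.2 []) 3
          (PySem.List.pyGetD r 3 0 + PySem.List.pyGetD (PySem.List.pyGetD s.1 s.2 []) 3 0)),
     s.2)
  else (s.1 ++ [r], s.2 + 1)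

def hebin (da : List (List Int)) : List (List Int) :=
  ((PySem.List.pyRange 1 da.length 1).foldl
      (fun s i => hebinStep s (PySem.List.pyGetD da i []))
      ([PySem.List.pyGetD da 0 []], 0)).1

-- ===== PORT B =====
-- body of B's second pass: the output row for the cut pair (s, e)
def hebinRunRow (da : List (List Int)) (s e : Int) : List Int :=
  let first := PySem.List.pyGetD da s []
  if 1 < e - s then
    PySem.List.pySetD first 3
      (((PySem.List.slice da (some (s + 1)) (some e)).map
          (fun r => PySem.List.pyGetD r 3 0)).sum + PySem.List.pyGetD first 3 0)
  else first

def hebin_alt (da : List (List Int)) : List (List Int) :=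
  let n : Int := da.length
  let cuts : List Int :=
    0 :: ((PySem.List.pyRange 1 n 1).filter (fun i =>
        !(PySem.List.pyGetD (PySem.List.pyGetD da i []) 1 0 ==
          PySem.List.pyGetD (PySem.List.pyGetD da (i - 1) []) 1 0)) ++ [n])
  -- cuts[1:] is cuts.tail (PySem.List.slice_from_one)
  (cuts.zip cuts.tail).foldl (fun x p => x ++ [hebinRunRow da p.1 p.2]) []

-- ===== PRECONDITION & SPEC =====
-- Pre_ excludes exactly the inputs on which the Python programs raise IndexError: the empty list
-- (da[0] in A, da[cuts[0]] in B), rows shorter than 2 when there are at least two rows (index 1 is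
-- read on every row), and rows shorter than 4 adjacent to an equal-key row (index 3 is read/assigned
-- inside runs). On every input it excludes both A and B raise.
def Pre_hebin (da : List (List Int)) : Prop :=
  da ≠ [] ∧ (2 ≤ da.length → ∀ r ∈ da, 2 ≤ r.length) ∧
  ∀ i ∈ List.range (da.length - 1),
    (da.getD i []).getD 1 0 = (da.getD (i+1) []).getD 1 0 →
    4 ≤ (da.getD i []).length ∧ 4 ≤ (da.getD (i+1) []).length
instance (da : List (List Int)) : Decidable (Pre_hebin da) := by unfold Pre_hebin; infer_instance

def pvWitness_hebin : List (List Int) := [[0, 1, 0, 7], [0, 1, 0, 8], [0, 2, 9]]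

def Spec_hebin (da : List (List Int)) (out : List (List Int)) : Prop := out = hebin_alt da
instance (da : List (List Int)) (out : List (List Int)) : Decidable (Spec_hebin da out) := by unfold Spec_hebin; infer_instance

-- ===== CLAIM (what is proved, stated in full; the proofs are below) =====
def Claim_equal_hebin : Prop := ∀ (da : List (List Int)), Dom_hebin da → Pre_hebin da → Spec_hebin da (hebin da)

-- ===== LEMMAS AND PROOFS =====

-- the key of a row, as both ports read it
def hebinKey (r : List Int) : Int := PySem.List.pyGetD r 1 0
-- field 3 of a row, as both ports read it
def hebinF3 (r : List Int) : Int := PySem.List.pyGetD r 3 0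
-- one accumulation step of a run (A's then-branch, restricted to the row being updated)
def hebinAcc (first r : List Int) : List Int :=
  PySem.List.pySetD first 3 (hebinF3 r + hebinF3 first)

-- run-recursion normal form both ports are reduced to
def hebinRuns : List (List Int) → List (List Int)
  | [] => []
  | first :: rest =>
    let sameKey := fun r => hebinKey r == hebinKey first
    (rest.takeWhile sameKey).foldl hebinAcc first ::
      hebinRuns (rest.dropWhile sameKey)
termination_by l => l.length
decreasing_by
  exact Nat.lt_succ_of_le (List.length_dropWhile_le _ _)

theorem hebinRuns_cons (first : List Int) (rest : List (List Int)) :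
    hebinRuns (first :: rest) =
      (rest.takeWhile (fun r => hebinKey r == hebinKey first)).foldl hebinAcc first ::
        hebinRuns (rest.dropWhile (fun r => hebinKey r == hebinKey first)) := by
  rw [hebinRuns]

-- setting index 3 does not change what index 1 reads
theorem hebinKey_hebinAcc (l r : List Int) : hebinKey (hebinAcc l r) = hebinKey l := by
  unfold hebinAcc hebinKey
  rw [show (3 : Int) = ((3 : ℕ) : Int) by norm_num, PySem.List.pySetD_natCast]
  simp [PySem.List.pyGetD_ofNat', List.getD]

-- ===== A-side: A's loop equals the run recursion =====
theorem hebin_loop_eq (ys : List (List Int)) : ∀ (front : List (List Int)) (cur : List Int),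
    (ys.foldl hebinStep (front ++ [cur], (front.length : Int))).1 = front ++ hebinRuns (cur :: ys) := by
  induction ys with
  | nil =>
    intro front cur
    simp [hebinRuns_cons, hebinRuns]
  | cons y ys ih =>
    intro front cur
    have hget : PySem.List.pyGetD (front ++ [cur]) (front.length : Int) [] = cur := by
      simp [PySem.List.pyGetD_natCast, List.getD]
    by_cases h : PySem.List.pyGetD y 1 0 = PySem.List.pyGetD cur 1 0
    · have hstep : hebinStep (front ++ [cur], (front.length : Int)) y
          = (front ++ [hebinAcc cur y], (front.length : Int)) := by
        simp [hebinStep, hget, h, hebinAcc, hebinF3, PySem.List.pySetD_natCast,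
          List.set_append_right]
      rw [List.foldl_cons, hstep, ih front (hebinAcc cur y)]
      rw [hebinRuns_cons, hebinRuns_cons]
      have hkey : PySem.List.pyGetD (hebinAcc cur y) 1 0 = PySem.List.pyGetD cur 1 0 := by
        simpa [hebinKey] using hebinKey_hebinAcc cur y
      simp only [List.takeWhile, List.dropWhile, hebinKey, hkey, h, beq_self_eq_true]
      simp
    · have hstep : hebinStep (front ++ [cur], (front.length : Int)) y
          = ((front ++ [cur]) ++ [y], ((front ++ [cur]).length : Int)) := by
        simp [hebinStep, hget, h]
      rw [List.foldl_cons, hstep, ih (front ++ [cur]) y]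
      rw [hebinRuns_cons (first := cur)]
      simp only [List.takeWhile, List.dropWhile]
      have : (hebinKey y == hebinKey cur) = false := by
        simp [hebinKey, h]
      simp [this]

theorem hebin_eq_runs (da : List (List Int)) (h : da ≠ []) : hebin da = hebinRuns da := by
  obtain ⟨r0, rest, rfl⟩ := List.exists_cons_of_ne_nil h
  unfold hebin
  rw [PySem.List.foldl_pyRange_pyGetD' (r0 :: rest) [] (a := 1) (by norm_num)
        (f := hebinStep) (init := ([PySem.List.pyGetD (r0 :: rest) 0 []], 0))]
  have h0 : PySem.List.pyGetD (r0 :: rest) 0 [] = r0 := by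
    simp [PySem.List.pyGetD_ofNat']
  rw [h0]
  have := hebin_loop_eq rest [] r0
  simpa using this

-- ===== B-side: B's cut-pair pass equals the run recursion =====

-- Nat-level boundary list: the cut indices strictly between 0 and da.length
def hebinBnd (da : List (List Int)) : List Nat :=
  ((List.range (da.length - 1)).filter
    (fun k => !(hebinKey (da.getD (k+1) []) == hebinKey (da.getD k [])))).map (· + 1)

-- Nat-level run row
def hebinNatRow (da : List (List Int)) (s e : Nat) : List Int :=
  let first := da.getD s []
  if s + 1 < e then
    first.set 3 (((((da.drop (s+1)).take (e - s - 1)).map hebinF3).sum) + hebinF3 first)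
  else first

-- the Nat-level cut-pair pass
def hebinOutN (da : List (List Int)) : List (List Int) :=
  ((0 :: hebinBnd da ++ [da.length]).zip (hebinBnd da ++ [da.length])).map
    (fun p => hebinNatRow da p.1 p.2)

-- the run condition of Pre_hebin, reused for the induction
def hebinPre4 (da : List (List Int)) : Prop :=
  ∀ i ∈ List.range (da.length - 1),
    (da.getD i []).getD 1 0 = (da.getD (i+1) []).getD 1 0 →
    4 ≤ (da.getD i []).length ∧ 4 ≤ (da.getD (i+1) []).length

theorem hebinBnd_cons (a b : List Int) (l : List (List Int)) :
    hebinBnd (a :: b :: l) =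
      (if hebinKey b == hebinKey a then [] else [1]) ++ (hebinBnd (b :: l)).map (· + 1) := by
  unfold hebinBnd
  simp only [List.length_cons, Nat.add_sub_cancel, List.range_succ_eq_map,
    List.filter_cons, List.filter_map, List.getD_cons_succ, List.getD_cons_zero]
  by_cases h : (hebinKey b == hebinKey a) = true
  · simp [h, Function.comp_def, List.map_map, List.getElem?_cons_succ, Nat.succ_eq_add_one]
  · simp only [Bool.not_eq_true] at h
    simp [h, Function.comp_def, List.map_map, List.getElem?_cons_succ, Nat.succ_eq_add_one]

theorem hebinBnd_run : ∀ (t : List (List Int)) (c : List Int) (d : List (List Int)),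
    (∀ r ∈ t, hebinKey r = hebinKey c) →
    (∀ x ∈ d.head?, (hebinKey x == hebinKey c) = false) →
    hebinBnd (c :: (t ++ d)) =
      if d.isEmpty then [] else (t.length + 1) :: (hebinBnd d).map (· + (t.length + 1)) := by
  intro t
  induction t with
  | nil =>
    intro c d _ hd
    cases d with
    | nil => rfl
    | cons h d' =>
      have := hd h (by simp)
      rw [List.nil_append, hebinBnd_cons, this]
      simp
  | cons r t' ih =>
    intro c d ht hd
    have hr : (hebinKey r == hebinKey c) = true := by
      simp [ht r (by simp)]
    have ht' : ∀ x ∈ t', hebinKey x = hebinKey r := by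
      intro x hx
      rw [ht x (List.mem_cons_of_mem _ hx), ht r (by simp)]
    have hd' : ∀ x ∈ d.head?, (hebinKey x == hebinKey r) = false := by
      intro x hx
      rw [ht r (by simp)]
      exact hd x hx
    have : (r :: t') ++ d = r :: (t' ++ d) := rfl
    rw [this, hebinBnd_cons, hr, ih r d ht' hd']
    cases d with
    | nil => simp
    | cons h d' =>
      simp [List.map_map, Function.comp_def, List.length_cons]
      intro a _
      omega

theorem hebinRunRow_natCast (da : List (List Int)) (s e : Nat) :
    hebinRunRow da (s : Int) (e : Int) = hebinNatRow da s e := by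
  unfold hebinRunRow hebinNatRow
  have hs1 : ((s : Int) + 1) = ((s + 1 : Nat) : Int) := by push_cast; ring
  rw [hs1, PySem.List.slice_natCast, PySem.List.pyGetD_natCast]
  have hcond : (1 < (e : Int) - (s : Int)) ↔ (s + 1 < e) := by omega
  by_cases h : s + 1 < e
  · rw [if_pos (hcond.mpr h), if_pos h,
      show (3 : Int) = ((3 : Nat) : Int) by norm_num, PySem.List.pySetD_natCast]
    rw [show e - (s + 1) = e - s - 1 by omega]
    simp only [hebinF3, PySem.List.pyGetD_ofNat', PySem.List.pyGetD_natCast]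
    have hf : (fun r : List Int => r.getD 3 0) = hebinF3 := by
      funext r; simp [hebinF3, PySem.List.pyGetD_ofNat']
    rw [hf]
  · rw [if_neg (fun hc => h (hcond.mp hc)), if_neg h]

theorem getD_set_self (c : List Int) (v : Int) (h : 3 < c.length) : (c.set 3 v).getD 3 0 = v := by
  simp [List.getD, h]

theorem foldl_hebinAcc_set (c : List Int) (h3 : 3 < c.length) :
    ∀ (t : List (List Int)) (v : Int),
      t.foldl hebinAcc (c.set 3 v) = c.set 3 ((t.map hebinF3).sum + v) := by
  intro t
  induction t with
  | nil => intro v; simp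
  | cons r t' ih =>
    intro v
    have hacc : hebinAcc (c.set 3 v) r = c.set 3 (hebinF3 r + v) := by
      unfold hebinAcc
      rw [show (3 : Int) = ((3 : Nat) : Int) by norm_num, PySem.List.pySetD_natCast]
      have : hebinF3 (c.set 3 v) = v := by
        simp only [hebinF3, PySem.List.pyGetD_ofNat']
        exact getD_set_self c v h3
      rw [this, List.set_set]
    rw [List.foldl_cons, hacc, ih (hebinF3 r + v)]
    congr 1
    simp
    ring

theorem foldl_hebinAcc (c : List Int) (h3 : 3 < c.length) (r : List Int) (t : List (List Int)) :
    (r :: t).foldl hebinAcc c = c.set 3 ((((r :: t).map hebinF3).sum) + hebinF3 c) := by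
  have hacc : hebinAcc c r = c.set 3 (hebinF3 r + hebinF3 c) := by
    unfold hebinAcc
    rw [show (3 : Int) = ((3 : Nat) : Int) by norm_num, PySem.List.pySetD_natCast]
  rw [List.foldl_cons, hacc, foldl_hebinAcc_set c h3]
  congr 1
  simp
  ring

theorem hebinNatRow_shift (pre d : List (List Int)) (s e : Nat) :
    hebinNatRow (pre ++ d) (s + pre.length) (e + pre.length) = hebinNatRow d s e := by
  unfold hebinNatRow
  have hget : (pre ++ d).getD (s + pre.length) [] = d.getD s [] := by
    rw [show s + pre.length = pre.length + s by omega]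
    simp [List.getD, List.getElem?_append_right]
  have hdrop : (pre ++ d).drop (s + pre.length + 1) = d.drop (s + 1) := by
    rw [show s + pre.length + 1 = pre.length + (s + 1) by omega]
    exact List.drop_length_add_append (s + 1)
  have hcond : (s + pre.length + 1 < e + pre.length) ↔ (s + 1 < e) := by omega
  rw [hget, hdrop, show e + pre.length - (s + pre.length) - 1 = e - s - 1 by omega]
  by_cases h : s + 1 < e
  · rw [if_pos (hcond.mpr h), if_pos h]
  · rw [if_neg (fun hc => h (hcond.mp hc)), if_neg h]

theorem hebinPre4_suffix (pre d : List (List Int)) (h : hebinPre4 (pre ++ d)) : hebinPre4 d := by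
  intro i hi hkey
  have hi' : i + pre.length ∈ List.range ((pre ++ d).length - 1) := by
    rw [List.mem_range] at hi ⊢
    simp [List.length_append]
    omega
  have hg : ∀ j : Nat, (pre ++ d).getD (j + pre.length) [] = d.getD j [] := by
    intro j
    rw [show j + pre.length = pre.length + j by omega]
    simp [List.getD, List.getElem?_append_right]
  have := h (i + pre.length) hi'
  rw [show i + pre.length + 1 = (i + 1) + pre.length by omega, hg, hg] at this
  exact this hkey

theorem hebin_dropWhile_head_false {α : Type} (p : α → Bool) (l t : List α) (h : α)
    (he : l.dropWhile p = h :: t) : p h = false := by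
  induction l with
  | nil => simp at he
  | cons a l ih =>
    rw [List.dropWhile_cons] at he
    split at he
    · exact ih he
    · rename_i hpa
      cases he
      simpa using hpa

theorem hebinNatRow_head (c : List Int) (t rest : List (List Int))
    (h3 : t ≠ [] → 3 < c.length) :
    hebinNatRow (c :: (t ++ rest)) 0 (t.length + 1) = t.foldl hebinAcc c := by
  cases t with
  | nil => simp [hebinNatRow]
  | cons r t' =>
    unfold hebinNatRow
    rw [if_pos (by simp)]
    simp only [List.getD_cons_zero, List.drop_succ_cons, List.drop_zero]
    rw [show (r :: t').length + 1 - 0 - 1 = (r :: t').length by omega, List.take_left]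
    rw [foldl_hebinAcc c (h3 (by simp)) r t']

theorem hebin_alt_eq_outN (da : List (List Int)) : hebin_alt da = hebinOutN da := by
  unfold hebin_alt hebinOutN
  have hF : (PySem.List.pyRange 1 (da.length : Int) 1).filter (fun i =>
        !(PySem.List.pyGetD (PySem.List.pyGetD da i []) 1 0 ==
          PySem.List.pyGetD (PySem.List.pyGetD da (i - 1) []) 1 0))
      = (hebinBnd da).map Int.ofNat := by
    rw [PySem.List.pyRange_one, List.filter_map]
    unfold hebinBnd
    rw [List.map_map]
    have hlen : ((da.length : Int) - 1).toNat = da.length - 1 := by omega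
    rw [hlen]
    have hpred : ∀ k ∈ List.range (da.length - 1),
        ((fun i =>
            !(PySem.List.pyGetD (PySem.List.pyGetD da i []) 1 0 ==
              PySem.List.pyGetD (PySem.List.pyGetD da (i - 1) []) 1 0)) ∘
          (fun k : Nat => (1 : Int) + (k : Int))) k
        = (fun k => !(hebinKey (da.getD (k+1) []) == hebinKey (da.getD k []))) k := by
      intro k _
      simp only [Function.comp_apply, hebinKey]
      rw [show (1 : Int) + (k : Int) = ((k + 1 : Nat) : Int) by push_cast; ring,
        PySem.List.pyGetD_natCast,
        show ((k + 1 : Nat) : Int) - 1 = ((k : Nat) : Int) by push_cast; ring,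
        PySem.List.pyGetD_natCast]
    rw [List.filter_congr hpred]
    apply List.map_congr_left
    intro k _
    simp only [Function.comp_apply, Int.ofNat_eq_natCast]
    push_cast
    ring
  dsimp only
  rw [hF]
  have hcuts : (0 :: ((hebinBnd da).map Int.ofNat ++ [(da.length : Int)]))
      = (0 :: hebinBnd da ++ [da.length]).map Int.ofNat := by
    simp [Int.ofNat_eq_natCast]
  rw [hcuts, ← List.map_tail, List.zip_map,
    PySem.List.foldl_append_singleton_eq_map (fun p : Int × Int => hebinRunRow da p.1 p.2),
    List.map_map, List.nil_append]
  apply List.map_congr_left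
  intro p _
  simp only [Function.comp_apply, Prod.map, Int.ofNat_eq_natCast]
  exact hebinRunRow_natCast da p.1 p.2

theorem hebinOutN_eq_runs : ∀ (n : Nat) (da : List (List Int)), da.length ≤ n → da ≠ [] →
    hebinPre4 da → hebinOutN da = hebinRuns da := by
  intro n
  induction n with
  | zero => intro da hlen hne _; simp at hlen; exact absurd hlen hne
  | succ n ih =>
    intro da hlen hne hpre
    obtain ⟨c, ys, rfl⟩ := List.exists_cons_of_ne_nil hne
    set p := fun r => hebinKey r == hebinKey c with hp
    set t := ys.takeWhile p with hT
    set d := ys.dropWhile p with hD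
    have hys : ys = t ++ d := by rw [hT, hD, List.takeWhile_append_dropWhile]
    have ht : ∀ r ∈ t, hebinKey r = hebinKey c := by
      intro r hr
      rw [hT] at hr
      have := List.mem_takeWhile_imp hr
      rw [hp] at this
      exact beq_iff_eq.mp (by simpa using this)
    have hd : ∀ x ∈ d.head?, (hebinKey x == hebinKey c) = false := by
      intro x hx
      cases hDc : d with
      | nil => rw [hDc] at hx; simp at hx
      | cons h d' =>
        rw [hDc] at hx
        simp at hx
        have hdw : ys.dropWhile p = h :: d' := by rw [← hD, hDc]
        have hph := hebin_dropWhile_head_false p ys d' h hdw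
        rw [hp] at hph
        rw [← hx]
        exact hph
    have h3 : t ≠ [] → 3 < c.length := by
      intro htne
      obtain ⟨r, t', hts⟩ := List.exists_cons_of_ne_nil htne
      have hmem : 0 ∈ List.range ((c :: ys).length - 1) := by
        rw [List.mem_range, hys, hts]
        simp
      have hkey : ((c :: ys).getD 0 []).getD 1 0 = ((c :: ys).getD 1 []).getD 1 0 := by
        have hrc : hebinKey r = hebinKey c := ht r (by rw [hts]; simp)
        simp only [hebinKey, PySem.List.pyGetD_ofNat'] at hrc
        have hy0 : ys.getD 0 [] = r := by rw [hys, hts]; rfl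
        rw [List.getD_cons_zero, List.getD_cons_succ, hy0, hrc]
      have h4 := (hpre 0 hmem hkey).1
      have hc0 : (c :: ys).getD 0 [] = c := rfl
      rw [hc0] at h4
      omega
    have hbnd : hebinBnd (c :: ys) =
        if d.isEmpty then [] else (t.length + 1) :: (hebinBnd d).map (· + (t.length + 1)) := by
      rw [hys]
      exact hebinBnd_run t c d ht hd
    have hruns : hebinRuns (c :: ys) = t.foldl hebinAcc c :: hebinRuns d := by
      rw [hebinRuns_cons]
    clear_value t d
    cases hDcase : d with
    | nil =>
      have hysn : ys = t := by rw [hys, hDcase, List.append_nil]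
      unfold hebinOutN
      rw [hbnd, hDcase, hruns, hysn]
      have hrow := hebinNatRow_head c t [] h3
      rw [List.append_nil] at hrow
      simp [hrow]
      rw [hDcase, hebinRuns]
    | cons h d' =>
      unfold hebinOutN
      rw [hbnd]
      rw [show ((if d.isEmpty then [] else (t.length + 1) :: (hebinBnd d).map (· + (t.length + 1))))
          = (t.length + 1) :: (hebinBnd d).map (· + (t.length + 1)) from by rw [hDcase]; simp]
      have hlen2 : (c :: ys).length = d.length + (t.length + 1) := by
        rw [hys]; simp; omega
      rw [hlen2, hruns]
      set k := t.length + 1 with hk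
      simp only [List.cons_append]
      rw [List.zip_cons_cons, List.map_cons]
      have hv : (k :: (List.map (fun x => x + k) (hebinBnd d) ++ [d.length + k]))
          = (0 :: hebinBnd d ++ [d.length]).map (fun x => x + k) := by simp
      have hu : (List.map (fun x => x + k) (hebinBnd d) ++ [d.length + k])
          = (hebinBnd d ++ [d.length]).map (fun x => x + k) := by simp
      rw [hv, hu, List.zip_map, List.map_map]
      congr 1
      · rw [hys]
        exact hebinNatRow_head c t d h3
      · have hpre' : hebinPre4 d := by
          apply hebinPre4_suffix (c :: t) d
          rw [show (c :: t) ++ d = c :: (t ++ d) from rfl, ← hys]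
          exact hpre
        have hdn : d ≠ [] := by rw [hDcase]; simp
        have hdl : d.length ≤ n := by
          rw [hys] at hlen
          simp at hlen
          omega
        have hout := ih d hdl hdn hpre'
        rw [← hout]
        unfold hebinOutN
        apply List.map_congr_left
        intro q hq
        simp only [Function.comp_apply, Prod.map]
        have hsh := hebinNatRow_shift (c :: t) d q.1 q.2
        rw [show (c :: t) ++ d = c :: (t ++ d) from rfl, ← hys] at hsh
        rw [show (c :: t).length = k from by simp [hk]] at hsh
        exact hsh

theorem hebin_alt_eq_runs (da : List (List Int)) (hne : da ≠ []) (hpre : hebinPre4 da) :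
    hebin_alt da = hebinRuns da := by
  rw [hebin_alt_eq_outN]
  exact hebinOutN_eq_runs da.length da le_rfl hne hpre

-- ===== VERDICT (by name: the statement is the Claim_ definition above) =====
theorem hebin_spec : Claim_equal_hebin := by
  intro da _ hpre
  unfold Spec_hebin
  rw [hebin_eq_runs da hpre.1, hebin_alt_eq_runs da hpre.1 hpre.2.2]
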